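-- pv_equiv track=rewrite | github.com/ankitagupta820/Data-Minning-using-Yelp-Dataset | Clustering/src/task1.py | segregate_single_point_clusters
-- ===== SOURCE A (Python) =====
-- import copy
--
-- def segregate_single_point_clusters(centroids: dict, statistics: dict, points: dict):
--
--    # remove clusters and points with 1 point
--     remaining_points = dict()
--     temp_cluster_result = copy.deepcopy(points)
--     for centroid, cluster_points in temp_cluster_result.items():
--         if len(cluster_points) <= 1:
--             if len(cluster_points) != 0:
--                 remaining_points.update({cluster_points[0]: centroids.get(centroid)})
--             points.pop(centroid)
--             centroids.pop(centroid)
--             statistics.pop(centroid)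
--
--     return centroids, statistics, points, remaining_points
-- ===== SOURCE B (Python) =====
-- def segregate_single_point_clusters(centroids: dict, statistics: dict, points: dict):
--     # rebuild-by-filter: compute the small-cluster key set, then return fresh dicts
--     # keeping only the multi-point clusters (no in-place mutation of the arguments)
--     small = {c for c, ps in points.items() if len(ps) <= 1}
--     remaining_points = {ps[0]: centroids[c] for c, ps in points.items() if len(ps) == 1}
--     new_centroids = {c: v for c, v in centroids.items() if c not in small}
--     new_statistics = {c: v for c, v in statistics.items() if c not in small}
--     new_points = {c: ps for c, ps in points.items() if c not in small}
--     return new_centroids, new_statistics, new_points, remaining_points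
-- ===== Notes on version B (the rewrite author's own statement) =====
-- stated objective: alternative
-- what changed: Replaces A's deepcopy-iterate-and-pop mutation pass with a pure rebuild: compute the set of small-cluster keys, then return fresh dicts built by filtering each input dict against that set (B does not mutate its arguments; the equivalence is about the return value).
import Mathlib
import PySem

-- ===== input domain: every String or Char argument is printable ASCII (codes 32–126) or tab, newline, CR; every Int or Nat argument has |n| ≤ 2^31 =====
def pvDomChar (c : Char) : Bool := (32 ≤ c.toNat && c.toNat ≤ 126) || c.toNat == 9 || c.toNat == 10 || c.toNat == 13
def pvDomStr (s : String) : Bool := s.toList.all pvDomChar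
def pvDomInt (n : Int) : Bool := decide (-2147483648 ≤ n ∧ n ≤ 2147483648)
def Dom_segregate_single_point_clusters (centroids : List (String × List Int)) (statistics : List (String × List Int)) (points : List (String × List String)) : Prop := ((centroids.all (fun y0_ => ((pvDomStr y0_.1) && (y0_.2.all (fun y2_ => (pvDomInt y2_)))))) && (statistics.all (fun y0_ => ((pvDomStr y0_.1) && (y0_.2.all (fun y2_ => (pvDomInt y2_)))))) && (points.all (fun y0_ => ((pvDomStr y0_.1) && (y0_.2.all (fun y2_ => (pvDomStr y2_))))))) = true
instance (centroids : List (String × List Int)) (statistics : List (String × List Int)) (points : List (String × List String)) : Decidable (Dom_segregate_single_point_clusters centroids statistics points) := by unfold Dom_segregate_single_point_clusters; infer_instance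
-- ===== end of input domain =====

-- B replaces A's deepcopy-iterate-and-pop mutation pass with a pure rebuild: it computes the
-- set of small-cluster keys and returns FRESH dicts obtained by filtering each input dict
-- against that set.  A mutates its dict arguments in place; B does not — the equivalence
-- proved here is about the RETURN value only.


-- ===== PORT A =====
-- loop body of A: one iteration over an item (centroid, cluster_points) of the deepcopy of
-- points, mutating the state (centroids, statistics, points, remaining_points).
-- `centroids.get(centroid)` is read BEFORE the pops, as in A.  Under Pre_ below the popped
-- key is always present (Python's pop would raise KeyError otherwise) and `cluster_points[0]`
-- is guarded by `len != 0`, so `.getD` defaults are never reached inside Pre_.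
def pvStepA (st : PySem.Dict String (List Int) × PySem.Dict String (List Int) × PySem.Dict String (List String) × PySem.Dict String (List Int))
    (cp : String × List String) :
    PySem.Dict String (List Int) × PySem.Dict String (List Int) × PySem.Dict String (List String) × PySem.Dict String (List Int) :=
  if cp.2.length ≤ 1 then
    (st.1.erase cp.1, st.2.1.erase cp.1, st.2.2.1.erase cp.1,
     if cp.2.length ≠ 0 then st.2.2.2.insert ((PySem.List.pyGet? cp.2 0).getD "") (st.1.getD cp.1 []) else st.2.2.2)
  else st

def segregate_single_point_clusters (centroids : List (String × List Int)) (statistics : List (String × List Int)) (points : List (String × List String)) : (List (String × List Int)) × (List (String × List Int)) × (List (String × List String)) × (List (String × List Int)) :=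
  let r := points.foldl pvStepA
    (PySem.Dict.mk centroids, PySem.Dict.mk statistics, PySem.Dict.mk points, PySem.Dict.empty)
  (r.1.items, r.2.1.items, r.2.2.1.items, r.2.2.2.items)

-- ===== PORT B =====
-- loop body of B's dict comprehension {ps[0]: centroids[c] for c, ps in points.items() if len(ps) == 1};
-- centroids[c] exists under Pre_, so .getD's default is never reached inside Pre_.
def pvStepB (C0 : PySem.Dict String (List Int)) (R : PySem.Dict String (List Int)) (cp : String × List String) : PySem.Dict String (List Int) :=
  if cp.2.length = 1 then R.insert ((PySem.List.pyGet? cp.2 0).getD "") (C0.getD cp.1 []) else R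

-- the three `{c: v for c, v in d.items() if c not in small}` comprehensions over a dict
-- (distinct keys) produce exactly the filtered item lists.
def segregate_single_point_clusters_alt (centroids : List (String × List Int)) (statistics : List (String × List Int)) (points : List (String × List String)) : (List (String × List Int)) × (List (String × List Int)) × (List (String × List String)) × (List (String × List Int)) :=
  let C0 := PySem.Dict.mk centroids
  let small := PySem.Set.ofList ((points.filter (fun cp => cp.2.length ≤ 1)).map Prod.fst)
  let remaining := points.foldl (pvStepB C0) PySem.Dict.empty
  (centroids.filter (fun q => !(PySem.Set.contains small q.1)),
   statistics.filter (fun q => !(PySem.Set.contains small q.1)),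
   points.filter (fun q => !(PySem.Set.contains small q.1)),
   remaining.items)

-- ===== PRECONDITION & SPEC =====
-- The three arguments are Python dicts, so their key lists are duplicate-free; and A raises
-- KeyError (centroids.pop / statistics.pop) unless every cluster with ≤ 1 points has its key
-- in centroids and in statistics — Pre_ excludes exactly the duplicate-key lists (which no
-- Python dict produces) and the KeyError inputs.
def Pre_segregate_single_point_clusters (centroids : List (String × List Int)) (statistics : List (String × List Int)) (points : List (String × List String)) : Prop :=
  (points.map Prod.fst).Nodup ∧ (centroids.map Prod.fst).Nodup ∧ (statistics.map Prod.fst).Nodup ∧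
  ∀ cp ∈ points, cp.2.length ≤ 1 → cp.1 ∈ centroids.map Prod.fst ∧ cp.1 ∈ statistics.map Prod.fst
instance (centroids : List (String × List Int)) (statistics : List (String × List Int)) (points : List (String × List String)) : Decidable (Pre_segregate_single_point_clusters centroids statistics points) := by unfold Pre_segregate_single_point_clusters; infer_instance

def pvWitness_segregate_single_point_clusters : (List (String × List Int)) × (List (String × List Int)) × (List (String × List String)) :=
  ([("a", [1, 2]), ("b", [3, 4])], [("a", [0]), ("b", [0])], [("a", ["p"]), ("b", ["q", "r"])])

def Spec_segregate_single_point_clusters (centroids : List (String × List Int)) (statistics : List (String × List Int)) (points : List (String × List String)) (out : (List (String × List Int)) × (List (String × List Int)) × (List (String × List String)) × (List (String × List Int))) : Prop := out = segregate_single_point_clusters_alt centroids statistics points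
instance (centroids : List (String × List Int)) (statistics : List (String × List Int)) (points : List (String × List String)) (out : (List (String × List Int)) × (List (String × List Int)) × (List (String × List String)) × (List (String × List Int))) : Decidable (Spec_segregate_single_point_clusters centroids statistics points out) := by
  unfold Spec_segregate_single_point_clusters
  exact @instDecidableEqProd _ _ inferInstance (@instDecidableEqProd _ _ inferInstance inferInstance) out _

-- ===== CLAIM (what is proved, stated in full; the proofs are below) =====
def Claim_equal_segregate_single_point_clusters : Prop := ∀ (centroids : List (String × List Int)) (statistics : List (String × List Int)) (points : List (String × List String)), Dom_segregate_single_point_clusters centroids statistics points → Pre_segregate_single_point_clusters centroids statistics points → Spec_segregate_single_point_clusters centroids statistics points (segregate_single_point_clusters centroids statistics points)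

-- ===== LEMMAS AND PROOFS =====

-- erasing a key k does not change lookups of another key k'
theorem find?_filter_erase {ν : Type} (l : List (String × ν)) (k k' : String) (h : k' ≠ k) :
    (l.filter (fun p => !(p.1 == k))).find? (fun p => p.1 == k') = l.find? (fun p => p.1 == k') := by
  induction l with
  | nil => rfl
  | cons p t ih =>
      have hkk' : (k == k') = false := by simpa using (Ne.symm h)
      by_cases hp : p.1 = k
      · simp [hp, hkk', ih]
      · by_cases hq : p.1 = k'
        · simp [hq, h]
        · simp [hp, hq, ih]

theorem getD_erase_of_ne {ν : Type} (d : PySem.Dict String ν) (k k' : String) (h : k' ≠ k) (v : ν) :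
    (d.erase k).getD k' v = d.getD k' v := by
  obtain ⟨l⟩ := d
  simp only [PySem.Dict.erase, PySem.Dict.getD, PySem.Dict.get?,
    find?_filter_erase l k k' h]

-- the interleaved loop of A: erases and remaining-point insertions can be staged
theorem loop_decompose (l : List (String × List String))
    (C S : PySem.Dict String (List Int)) (P : PySem.Dict String (List String)) (R : PySem.Dict String (List Int))
    (h : (l.map Prod.fst).Nodup) :
    l.foldl pvStepA (C, S, P, R) =
      (((l.filter (fun cp => cp.2.length ≤ 1)).map (fun cp => cp.1)).foldl PySem.Dict.erase C,
       ((l.filter (fun cp => cp.2.length ≤ 1)).map (fun cp => cp.1)).foldl PySem.Dict.erase S,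
       ((l.filter (fun cp => cp.2.length ≤ 1)).map (fun cp => cp.1)).foldl PySem.Dict.erase P,
       l.foldl (pvStepB C) R) := by
  induction l generalizing C S P R with
  | nil => rfl
  | cons cp t ih =>
      simp only [List.map_cons, List.nodup_cons] at h
      obtain ⟨hcp, ht⟩ := h
      by_cases h1 : cp.2.length ≤ 1
      · have hfold : ∀ R0 : PySem.Dict String (List Int),
            t.foldl (pvStepB (C.erase cp.1)) R0 = t.foldl (pvStepB C) R0 := by
          intro R0
          refine PySem.List.foldl_congr_mem t _ _ R0 (fun acc x hx => ?_)
          have hne : x.1 ≠ cp.1 := by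
            intro he; exact hcp (he ▸ List.mem_map_of_mem hx)
          simp only [pvStepB, getD_erase_of_ne C cp.1 x.1 hne]
        have hR' : pvStepA (C, S, P, R) cp = (C.erase cp.1, S.erase cp.1, P.erase cp.1, pvStepB C R cp) := by
          simp only [pvStepA, pvStepB, if_pos h1]
          congr 1
          by_cases h0 : cp.2.length = 0
          · simp [h0]
          · have : cp.2.length = 1 := by omega
            simp [this]
        rw [List.foldl_cons, hR', ih _ _ _ _ ht,
            List.filter_cons_of_pos (by simpa using h1), List.map_cons]
        simp only [List.foldl_cons]
        rw [hfold]
      · rw [List.foldl_cons, List.foldl_cons,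
            List.filter_cons_of_neg (by simpa using h1)]
        have : pvStepA (C, S, P, R) cp = (C, S, P, R) := by simp [pvStepA, h1]
        have hB : pvStepB C R cp = R := by
          simp only [pvStepB, if_neg (by omega : ¬ cp.2.length = 1)]
        rw [this, hB, ih _ _ _ _ ht]

-- a fold of erases over a key list filters the item list by non-membership
theorem items_foldl_erase {ν : Type} (ks : List String) (d : PySem.Dict String ν) :
    (ks.foldl PySem.Dict.erase d).items = d.items.filter (fun q => !(ks.contains q.1)) := by
  induction ks generalizing d with
  | nil => simp
  | cons k t ih =>
      rw [List.foldl_cons, ih]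
      obtain ⟨l⟩ := d
      simp only [PySem.Dict.erase, List.filter_filter]
      apply List.filter_congr
      intro q _
      simp [beq_eq_decide, Bool.and_comm, eq_comm]

-- membership in a Python set built from a list is list membership
theorem set_contains_ofList (ks : List String) (x : String) :
    PySem.Set.contains (PySem.Set.ofList ks) x = ks.contains x := by
  simp only [PySem.Set.contains]
  rw [Bool.eq_iff_iff]
  simp [PySem.Set.mem_ofList]

-- ===== VERDICT (by name: the statement is the Claim_ definition above) =====
theorem segregate_single_point_clusters_spec : Claim_equal_segregate_single_point_clusters := by
  intro centroids statistics points _ hpre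
  unfold Spec_segregate_single_point_clusters
  unfold segregate_single_point_clusters segregate_single_point_clusters_alt
  rw [loop_decompose _ _ _ _ _ hpre.1]
  simp only [items_foldl_erase, set_contains_ofList]
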